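-- pv_equiv track=rewrite | github.com/sbadamikar-research/coding_practice | DeepML/067_CompressedSparseColumn.py | compressed_col_sparse_matrix
-- ===== SOURCE A (Python) =====
-- def compressed_col_sparse_matrix(dense_matrix):
--     """
--     Convert a dense matrix into its Compressed Column Sparse (CSC) representation.
--
--     :param dense_matrix: List of lists representing the dense matrix
--     :return: Tuple of (values, row indices, column pointer)
--     """
--
--     vals = []
--     row_idx = []
--     col_ptr = [0]
--
--     count = 0
--     for col in range(len(dense_matrix[0])):
--         for row in range(len(dense_matrix)):
--             val = dense_matrix[row][col]
--             if (val != 0):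
--                 vals.append(val)
--                 row_idx.append(row)
--                 count += 1
--
--         col_ptr.append(count)
--
--     return vals, row_idx, col_ptr
-- ===== SOURCE B (Python) =====
-- def compressed_col_sparse_matrix(dense_matrix):
--     """CSC via one row-major pass grouping nonzeros per column in a dict, then an emit pass."""
--     n_cols = len(dense_matrix[0])
--     buckets = {}
--     for r, row in enumerate(dense_matrix):
--         for c in range(n_cols):
--             v = row[c]
--             if v != 0:
--                 buckets.setdefault(c, []).append((v, r))
--     vals = []
--     row_idx = []
--     col_ptr = [0]
--     total = 0
--     for c in range(n_cols):
--         bucket = buckets.get(c, [])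
--         vals += [v for v, _ in bucket]
--         row_idx += [r for _, r in bucket]
--         total += len(bucket)
--         col_ptr.append(total)
--     return vals, row_idx, col_ptr
-- ===== Notes on version B (the rewrite author's own statement) =====
-- stated objective: alternative
-- what changed: A scans the matrix column-by-column appending as it goes; B makes a single row-major pass that groups the nonzeros per column into a dict of buckets, then emits values/row indices/pointers from the buckets in a second pass.
import Mathlib
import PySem

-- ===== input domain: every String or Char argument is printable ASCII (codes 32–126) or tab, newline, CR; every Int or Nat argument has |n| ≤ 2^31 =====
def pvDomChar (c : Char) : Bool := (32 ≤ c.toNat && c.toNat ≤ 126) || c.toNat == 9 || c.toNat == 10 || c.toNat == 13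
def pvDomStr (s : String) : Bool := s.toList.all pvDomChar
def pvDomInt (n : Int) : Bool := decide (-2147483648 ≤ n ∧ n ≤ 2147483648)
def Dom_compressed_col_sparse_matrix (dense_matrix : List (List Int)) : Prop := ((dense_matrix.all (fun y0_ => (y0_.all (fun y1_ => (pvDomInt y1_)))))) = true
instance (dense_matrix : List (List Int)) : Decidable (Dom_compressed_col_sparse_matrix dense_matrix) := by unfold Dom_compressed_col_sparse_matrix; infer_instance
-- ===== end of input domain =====

-- B replaces A's column-by-column append scan with one row-major pass grouping nonzeros
-- per column into a dict of buckets plus an emit pass (alternative decomposition, same cost).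


-- ===== PORT A =====
-- Literal port of A. dense_matrix[row][col] is ported with pyGetD (default value):
-- exact under Pre_ (the matrix is nonempty and every index taken is in range).
def compressed_col_sparse_matrix (dense_matrix : List (List Int)) : List Int × List Int × List Int :=
  let ncols : Int := ((PySem.List.pyGetD dense_matrix 0 []).length : Int)
  let nrows : Int := (dense_matrix.length : Int)
  let st := (PySem.List.pyRange 0 ncols 1).foldl (fun st col =>
    let st2 := (PySem.List.pyRange 0 nrows 1).foldl (fun st row =>
      let val := PySem.List.pyGetD (PySem.List.pyGetD dense_matrix row []) col 0
      if val ≠ 0 then (st.1 ++ [val], st.2.1 ++ [row], st.2.2.1, st.2.2.2 + 1) else st) st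
    (st2.1, st2.2.1, st2.2.2.1 ++ [st2.2.2.2], st2.2.2.2))
    (([] : List Int), ([] : List Int), ([(0 : Int)] : List Int), (0 : Int))
  (st.1, st.2.1, st.2.2.1)

-- ===== PORT B =====
-- Literal port of Source B. row[c] ported with pyGetD (exact under Pre_);
-- `buckets.setdefault(c, []).append((v, r))` sets buckets[c] to buckets.get(c, []) + [(v, r)]
-- in place, which is exactly PySem.Dict.modify.
def compressed_col_sparse_matrix_alt (dense_matrix : List (List Int)) : List Int × List Int × List Int :=
  let ncols : Int := ((PySem.List.pyGetD dense_matrix 0 []).length : Int)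
  let buckets := (PySem.List.enumerate dense_matrix 0).foldl (fun d p =>
      (PySem.List.pyRange 0 ncols 1).foldl (fun d c =>
        let v := PySem.List.pyGetD p.2 c 0
        if v ≠ 0 then d.modify c ([] : List (Int × Int)) (· ++ [(v, p.1)]) else d) d)
    (PySem.Dict.empty)
  let st := (PySem.List.pyRange 0 ncols 1).foldl (fun st c =>
      let bucket := buckets.getD c []
      (st.1 ++ bucket.map (·.1), st.2.1 ++ bucket.map (·.2),
       st.2.2.1 ++ [st.2.2.2 + (bucket.length : Int)], st.2.2.2 + (bucket.length : Int)))
    (([] : List Int), ([] : List Int), ([(0 : Int)] : List Int), (0 : Int))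
  (st.1, st.2.1, st.2.2.1)

-- ===== PRECONDITION & SPEC =====
-- Pre_ excludes exactly the inputs on which Python A raises IndexError: the empty matrix
-- (dense_matrix[0]) and ragged matrices with a row shorter than row 0 (row[col]).
def Pre_compressed_col_sparse_matrix (dense_matrix : List (List Int)) : Prop :=
  dense_matrix ≠ [] ∧ ∀ row ∈ dense_matrix, (dense_matrix.headD []).length ≤ row.length
instance (dense_matrix : List (List Int)) : Decidable (Pre_compressed_col_sparse_matrix dense_matrix) := by unfold Pre_compressed_col_sparse_matrix; infer_instance
def pvWitness_compressed_col_sparse_matrix : List (List Int) := [[1, 0, 2], [0, 3, 0]]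

def Spec_compressed_col_sparse_matrix (dense_matrix : List (List Int)) (out : List Int × List Int × List Int) : Prop := out = compressed_col_sparse_matrix_alt dense_matrix
instance (dense_matrix : List (List Int)) (out : List Int × List Int × List Int) : Decidable (Spec_compressed_col_sparse_matrix dense_matrix out) := by unfold Spec_compressed_col_sparse_matrix; infer_instance

-- ===== CLAIM (what is proved, stated in full; the proofs are below) =====
def Claim_equal_compressed_col_sparse_matrix : Prop := ∀ (dense_matrix : List (List Int)), Dom_compressed_col_sparse_matrix dense_matrix → Pre_compressed_col_sparse_matrix dense_matrix → Spec_compressed_col_sparse_matrix dense_matrix (compressed_col_sparse_matrix dense_matrix)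

-- ===== LEMMAS AND PROOFS =====

-- the (value, row) pairs of column c, rows in increasing order
def pvColE (m : List (List Int)) (c : Int) : List (Int × Int) :=
  (PySem.List.enumerate m 0).filterMap (fun p =>
    if PySem.List.pyGetD p.2 c 0 ≠ 0 then some (PySem.List.pyGetD p.2 c 0, p.1) else none)

-- a conditional accumulation is a fold over the filterMap'd list
theorem pv_foldl_if_filterMap {α β γ : Type} (l : List α) (P : α → Prop) [DecidablePred P]
    (g : α → β) (f : γ → β → γ) (a : γ) :
    l.foldl (fun acc x => if P x then f acc (g x) else acc) a
      = (l.filterMap (fun x => if P x then some (g x) else none)).foldl f a := by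
  induction l generalizing a with
  | nil => rfl
  | cons x xs ih =>
    by_cases h : P x <;> simp [h, ih]

-- A's inner row loop, rewritten over an arbitrary list of (index, row) pairs
theorem pv_innerA (l : List (Int × List Int)) (c : Int) (vs rs cp : List Int) (k : Int) :
    l.foldl (fun st p =>
        if PySem.List.pyGetD p.2 c 0 ≠ 0 then
          (st.1 ++ [PySem.List.pyGetD p.2 c 0], st.2.1 ++ [p.1], st.2.2.1, st.2.2.2 + 1)
        else st) (vs, rs, cp, k)
      = (vs ++ (l.filterMap (fun p => if PySem.List.pyGetD p.2 c 0 ≠ 0 then some (PySem.List.pyGetD p.2 c 0, p.1) else none)).map (·.1),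
         rs ++ (l.filterMap (fun p => if PySem.List.pyGetD p.2 c 0 ≠ 0 then some (PySem.List.pyGetD p.2 c 0, p.1) else none)).map (·.2),
         cp,
         k + ((l.filterMap (fun p => if PySem.List.pyGetD p.2 c 0 ≠ 0 then some (PySem.List.pyGetD p.2 c 0, p.1) else none)).length : Int)) := by
  induction l generalizing vs rs k with
  | nil => simp
  | cons p ps ih =>
    simp only [List.foldl_cons]
    by_cases h : PySem.List.pyGetD p.2 c 0 ≠ 0
    · rw [if_pos h, ih]
      simp [h, List.append_assoc]
      omega
    · rw [if_neg h, ih]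
      simp [h]

-- keys produced from a Nodup list: filtering the filterMap at a present key keeps exactly its entry
theorem pv_filter_filterMap_nodup {β : Type} (l : List Int) (c : Int) (P : Int → Prop)
    [DecidablePred P] (h : Int → β) (hnd : l.Nodup) (hc : c ∈ l) :
    ((l.filterMap (fun x => if P x then some (x, h x) else none)).filter (fun q => q.1 == c))
      = if P c then [(c, h c)] else [] := by
  induction l with
  | nil => simp at hc
  | cons x xs ih =>
    simp only [List.nodup_cons] at hnd
    rcases List.mem_cons.mp hc with rfl | hmem
    · have hrest : ((xs.filterMap (fun y => if P y then some (y, h y) else none)).filter (fun q => q.1 == c)) = [] := by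
        rw [List.filter_eq_nil_iff]
        intro q hq
        obtain ⟨y, hy, hsome⟩ := List.mem_filterMap.mp hq
        by_cases hp : P y
        · rw [if_pos hp] at hsome
          obtain rfl := Option.some.inj hsome
          simp only [beq_iff_eq]
          exact fun e => hnd.1 (e ▸ hy)
        · rw [if_neg hp] at hsome
          cases hsome
      by_cases hp : P c <;> simp [hp, hrest]
    · have hne : x ≠ c := fun e => hnd.1 (e ▸ hmem)
      by_cases hp : P x <;> simp [hp, hne, ih hnd.2 hmem]

-- B's bucket for a column in range is exactly that column's (value, row) list
theorem pv_bucket (m : List (List Int)) (n c : Int) (hc : 0 ≤ c) (hlt : c < n) :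
    (((PySem.List.enumerate m 0).foldl (fun d p =>
        (PySem.List.pyRange 0 n 1).foldl (fun d c' =>
          let v := PySem.List.pyGetD p.2 c' 0
          if v ≠ 0 then d.modify c' ([] : List (Int × Int)) (· ++ [(v, p.1)]) else d) d)
      (PySem.Dict.empty : PySem.Dict Int (List (Int × Int)))).getD c [])
      = pvColE m c := by
  have hinner : ∀ (d : PySem.Dict Int (List (Int × Int))) (p : Int × List Int),
      (PySem.List.pyRange 0 n 1).foldl (fun d c' =>
          let v := PySem.List.pyGetD p.2 c' 0
          if v ≠ 0 then d.modify c' ([] : List (Int × Int)) (· ++ [(v, p.1)]) else d) d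
        = (((PySem.List.pyRange 0 n 1).filterMap (fun c' =>
              if PySem.List.pyGetD p.2 c' 0 ≠ 0 then some (c', (PySem.List.pyGetD p.2 c' 0, p.1)) else none)).foldl
            (fun d q => d.modify q.1 ([] : List (Int × Int)) (· ++ [q.2])) d) := by
    intro d p
    exact pv_foldl_if_filterMap (PySem.List.pyRange 0 n 1)
      (fun c' => PySem.List.pyGetD p.2 c' 0 ≠ 0)
      (fun c' => (c', (PySem.List.pyGetD p.2 c' 0, p.1)))
      (fun d q => d.modify q.1 ([] : List (Int × Int)) (· ++ [q.2])) d
  simp only [hinner]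
  rw [show ((PySem.List.enumerate m 0).foldl (fun d p =>
        (((PySem.List.pyRange 0 n 1).filterMap (fun c' =>
            if PySem.List.pyGetD p.2 c' 0 ≠ 0 then some (c', (PySem.List.pyGetD p.2 c' 0, p.1)) else none)).foldl
          (fun d q => d.modify q.1 ([] : List (Int × Int)) (· ++ [q.2])) d))
      (PySem.Dict.empty : PySem.Dict Int (List (Int × Int))))
      = (((PySem.List.enumerate m 0).flatMap (fun p =>
          (PySem.List.pyRange 0 n 1).filterMap (fun c' =>
            if PySem.List.pyGetD p.2 c' 0 ≠ 0 then some (c', (PySem.List.pyGetD p.2 c' 0, p.1)) else none))).foldl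
          (fun d q => d.modify q.1 ([] : List (Int × Int)) (· ++ [q.2]))
          (PySem.Dict.empty : PySem.Dict Int (List (Int × Int))))
    from (List.foldl_flatMap).symm]
  rw [PySem.Dict.getD_foldl_modify_append]
  rw [List.filter_flatMap]
  have hrow : ∀ p : Int × List Int,
      (((PySem.List.pyRange 0 n 1).filterMap (fun c' =>
          if PySem.List.pyGetD p.2 c' 0 ≠ 0 then some (c', (PySem.List.pyGetD p.2 c' 0, p.1)) else none)).filter
        (fun q => q.1 == c))
        = if PySem.List.pyGetD p.2 c 0 ≠ 0 then [(c, (PySem.List.pyGetD p.2 c 0, p.1))] else [] := by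
    intro p
    exact pv_filter_filterMap_nodup (PySem.List.pyRange 0 n 1) c
      (fun c' => PySem.List.pyGetD p.2 c' 0 ≠ 0)
      (fun c' => (PySem.List.pyGetD p.2 c' 0, p.1))
      (PySem.List.nodup_pyRange_one 0 n)
      ((PySem.List.mem_pyRange_one).mpr ⟨hc, hlt⟩)
  simp only [hrow]
  rw [List.map_flatMap]
  rw [pvColE, List.filterMap_eq_flatMap_toList]
  simp only [PySem.Dict.getD_empty, List.nil_append]
  congr 1
  funext p
  by_cases h : PySem.List.pyGetD p.2 c 0 ≠ 0 <;> simp [h]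

-- A's output as a fold over columns of pvColE
theorem pv_A_eq (m : List (List Int)) :
    compressed_col_sparse_matrix m
      = (let st := (PySem.List.pyRange 0 ((PySem.List.pyGetD m 0 []).length : Int) 1).foldl (fun st c =>
          (st.1 ++ (pvColE m c).map (·.1), st.2.1 ++ (pvColE m c).map (·.2),
           st.2.2.1 ++ [st.2.2.2 + ((pvColE m c).length : Int)], st.2.2.2 + ((pvColE m c).length : Int)))
          (([] : List Int), ([] : List Int), ([(0 : Int)] : List Int), (0 : Int))
        (st.1, st.2.1, st.2.2.1)) := by
  have h : (PySem.List.pyRange 0 ((PySem.List.pyGetD m 0 []).length : Int) 1).foldl (fun st col =>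
        let st2 := (PySem.List.pyRange 0 (m.length : Int) 1).foldl (fun st row =>
          let val := PySem.List.pyGetD (PySem.List.pyGetD m row []) col 0
          if val ≠ 0 then (st.1 ++ [val], st.2.1 ++ [row], st.2.2.1, st.2.2.2 + 1) else st) st
        (st2.1, st2.2.1, st2.2.2.1 ++ [st2.2.2.2], st2.2.2.2))
      (([] : List Int), ([] : List Int), ([(0 : Int)] : List Int), (0 : Int))
      = (PySem.List.pyRange 0 ((PySem.List.pyGetD m 0 []).length : Int) 1).foldl (fun st c =>
          (st.1 ++ (pvColE m c).map (·.1), st.2.1 ++ (pvColE m c).map (·.2),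
           st.2.2.1 ++ [st.2.2.2 + ((pvColE m c).length : Int)], st.2.2.2 + ((pvColE m c).length : Int)))
      (([] : List Int), ([] : List Int), ([(0 : Int)] : List Int), (0 : Int)) := by
    apply PySem.List.foldl_congr_mem
    intro st col _
    have hmap : PySem.List.enumerate m
        = (PySem.List.pyRange 0 (m.length : Int) 1).map (fun j => (j, PySem.List.pyGetD m j ([] : List Int))) := by
      simpa using PySem.List.enumerate_eq_map_pyRange m ([] : List Int)
    have hfold : (PySem.List.pyRange 0 (m.length : Int) 1).foldl (fun st row =>
          let val := PySem.List.pyGetD (PySem.List.pyGetD m row []) col 0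
          if val ≠ 0 then (st.1 ++ [val], st.2.1 ++ [row], st.2.2.1, st.2.2.2 + 1) else st) st
        = (PySem.List.enumerate m).foldl (fun st p =>
            if PySem.List.pyGetD p.2 col 0 ≠ 0 then
              (st.1 ++ [PySem.List.pyGetD p.2 col 0], st.2.1 ++ [p.1], st.2.2.1, st.2.2.2 + 1)
            else st) st := by
      rw [hmap, List.foldl_map]
    show (let st2 := (PySem.List.pyRange 0 (m.length : Int) 1).foldl (fun st row =>
          let val := PySem.List.pyGetD (PySem.List.pyGetD m row []) col 0
          if val ≠ 0 then (st.1 ++ [val], st.2.1 ++ [row], st.2.2.1, st.2.2.2 + 1) else st) st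
        (st2.1, st2.2.1, st2.2.2.1 ++ [st2.2.2.2], st2.2.2.2)) = _
    rw [hfold]
    obtain ⟨vs, rs, cp, k⟩ := st
    rw [pv_innerA]
    rfl
  rw [compressed_col_sparse_matrix, h]

-- ===== VERDICT (by name: the statement is the Claim_ definition above) =====
theorem compressed_col_sparse_matrix_spec : Claim_equal_compressed_col_sparse_matrix := by
  intro m _ _
  unfold Spec_compressed_col_sparse_matrix
  rw [pv_A_eq, compressed_col_sparse_matrix_alt]
  have hcongr := PySem.List.foldl_congr_mem
    (l := PySem.List.pyRange 0 ((PySem.List.pyGetD m 0 []).length : Int) 1)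
    (init := (([] : List Int), ([] : List Int), ([(0 : Int)] : List Int), (0 : Int)))
    (f := fun st c =>
      (st.1 ++ (pvColE m c).map (·.1), st.2.1 ++ (pvColE m c).map (·.2),
       st.2.2.1 ++ [st.2.2.2 + ((pvColE m c).length : Int)], st.2.2.2 + ((pvColE m c).length : Int)))
    (g := fun st c =>
      let bucket := (((PySem.List.enumerate m 0).foldl (fun d p =>
          (PySem.List.pyRange 0 ((PySem.List.pyGetD m 0 []).length : Int) 1).foldl (fun d c' =>
            let v := PySem.List.pyGetD p.2 c' 0
            if v ≠ 0 then d.modify c' ([] : List (Int × Int)) (· ++ [(v, p.1)]) else d) d)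
        (PySem.Dict.empty : PySem.Dict Int (List (Int × Int)))).getD c [])
      (st.1 ++ bucket.map (·.1), st.2.1 ++ bucket.map (·.2),
       st.2.2.1 ++ [st.2.2.2 + (bucket.length : Int)], st.2.2.2 + (bucket.length : Int)))
    (by
      intro acc x hx
      obtain ⟨h0, hn⟩ := PySem.List.mem_pyRange_one.mp hx
      simp only [pv_bucket m _ x h0 hn])
  rw [hcongr]
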